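-- pv_equiv track=rewrite | github.com/lidacity/osm-validator | Check.py | GetCheckHighway
-- ===== SOURCE A (Python) =====
-- def GetCheckHighway(Ways):
--  Result = []
--  Highways = ["motorway", "trunk", "primary", "secondary", "tertiary", "unclassified", "residential", "motorway_link", "trunk_link", "primary_link", "secondary_link", "tertiary_link", ]
--  for Way in Ways:
--   Tag = Way['tags']
--   if 'highway' in Tag:
--    if Tag['highway'] not in Highways:
--     Result.append(f"памылковы 'highway'=\"{Tag['highway']}\" на way")
--     break
--  for Way in Ways:
--   Tag = Way['tags']
--   if not('highway' in Tag or 'ferry' in Tag):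
--    Result.append(f"пусты 'highway' на way")
--    break
--  return Result
-- ===== SOURCE B (Python) =====
-- def GetCheckHighway(Ways):
--     valid = {"motorway", "trunk", "primary", "secondary", "tertiary", "unclassified",
--              "residential", "motorway_link", "trunk_link", "primary_link",
--              "secondary_link", "tertiary_link"}
--     highway_error = None
--     empty_error = None
--     for Way in Ways:
--         Tag = Way['tags']
--         if 'highway' in Tag:
--             if Tag['highway'] not in valid and highway_error is None:
--                 highway_error = f"памылковы 'highway'=\"{Tag['highway']}\" на way"
--         elif 'ferry' not in Tag and empty_error is None:
--             empty_error = "пусты 'highway' на way"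
--     return [e for e in (highway_error, empty_error) if e is not None]
-- ===== Notes on version B (the rewrite author's own statement) =====
-- stated objective: alternative
-- what changed: B replaces A's two early-breaking scans of Ways by a single pass that fills two Option slots (first bad-highway message, first missing-highway message) and assembles the result afterwards.
import Mathlib
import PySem

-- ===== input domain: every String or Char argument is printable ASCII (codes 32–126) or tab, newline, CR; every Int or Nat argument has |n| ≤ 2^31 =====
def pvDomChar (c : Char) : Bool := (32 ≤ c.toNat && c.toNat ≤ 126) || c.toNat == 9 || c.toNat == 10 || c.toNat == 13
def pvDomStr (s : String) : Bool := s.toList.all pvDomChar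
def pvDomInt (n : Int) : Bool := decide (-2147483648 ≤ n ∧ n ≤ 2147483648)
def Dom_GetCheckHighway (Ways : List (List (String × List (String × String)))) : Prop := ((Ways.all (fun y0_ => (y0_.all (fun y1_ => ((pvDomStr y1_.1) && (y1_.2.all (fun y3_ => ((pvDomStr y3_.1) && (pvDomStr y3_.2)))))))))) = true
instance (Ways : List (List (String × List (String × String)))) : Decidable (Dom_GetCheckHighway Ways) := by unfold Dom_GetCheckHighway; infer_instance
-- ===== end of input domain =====

-- B replaces A's two early-breaking scans by a single pass filling two Option slots (same cost, different decomposition).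
-- Python dicts are association lists; d[k] / 'k in d' is first-match lookup, done here by pvGetKey.

-- ===== PORT A =====
-- first-match association-list lookup (= Python dict lookup; exact for the dicts built here)
def pvGetKey {α : Type} : List (String × α) → String → Option α
  | [], _ => none
  | (k', v) :: rest, k => if k' == k then some v else pvGetKey rest k

def pvHighways : List String := ["motorway", "trunk", "primary", "secondary", "tertiary", "unclassified", "residential", "motorway_link", "trunk_link", "primary_link", "secondary_link", "tertiary_link"]

def pvMsg1 (h : String) : String := "памылковы 'highway'=\"" ++ h ++ "\" на way"
def pvMsg2 : String := "пусты 'highway' на way"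

-- first loop of A: appends at most one message, then breaks ('Way["tags"]' defaults to [] only outside Pre_)
def pvLoop1 : List (List (String × List (String × String))) → List String
  | [] => []
  | w :: rest =>
    let tag := (pvGetKey w "tags").getD []
    match pvGetKey tag "highway" with
    | some h => if h ∈ pvHighways then pvLoop1 rest else [pvMsg1 h]
    | none => pvLoop1 rest

-- second loop of A
def pvLoop2 : List (List (String × List (String × String))) → List String
  | [] => []
  | w :: rest =>
    let tag := (pvGetKey w "tags").getD []
    if ¬((pvGetKey tag "highway").isSome ∨ (pvGetKey tag "ferry").isSome) then [pvMsg2]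
    else pvLoop2 rest

def GetCheckHighway (Ways : List (List (String × List (String × String)))) : List String :=
  pvLoop1 Ways ++ pvLoop2 Ways

-- ===== PORT B =====
def pvValidList : List String := ["motorway", "trunk", "primary", "secondary", "tertiary", "unclassified", "residential", "motorway_link", "trunk_link", "primary_link", "secondary_link", "tertiary_link"]
def pvValid : PySem.Set String := PySem.Set.ofList pvValidList

-- B's single pass: state = (highway_error, empty_error)
def pvAltLoop : List (List (String × List (String × String))) → Option String × Option String → Option String × Option String
  | [], st => st
  | w :: rest, (he, ee) =>
    let tag := (pvGetKey w "tags").getD []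
    match pvGetKey tag "highway" with
    | some h =>
      let he' := if h ∉ pvValid ∧ he = none then some (pvMsg1 h) else he
      pvAltLoop rest (he', ee)
    | none =>
      let ee' := if pvGetKey tag "ferry" = none ∧ ee = none then some pvMsg2 else ee
      pvAltLoop rest (he, ee')

def GetCheckHighway_alt (Ways : List (List (String × List (String × String)))) : List String :=
  let st := pvAltLoop Ways (none, none)
  st.1.toList ++ st.2.toList

-- ===== PRECONDITION & SPEC =====
-- Pre_ excludes Ways containing a dict without a 'tags' key: Python A raises KeyError on most of them,
-- and on the rest (a tagless way shadowed by both breaks) B raises where A returns, so they are excluded too.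
def Pre_GetCheckHighway (Ways : List (List (String × List (String × String)))) : Prop :=
  ∀ w ∈ Ways, "tags" ∈ w.map Prod.fst
instance (Ways : List (List (String × List (String × String)))) : Decidable (Pre_GetCheckHighway Ways) := by unfold Pre_GetCheckHighway; infer_instance
def pvWitness_GetCheckHighway : (List (List (String × List (String × String)))) :=
  [[("tags", [("highway", "primary")])], [("tags", [("ferry", "yes")])]]

def Spec_GetCheckHighway (Ways : List (List (String × List (String × String)))) (out : List String) : Prop := out = GetCheckHighway_alt Ways
instance (Ways : List (List (String × List (String × String)))) (out : List String) : Decidable (Spec_GetCheckHighway Ways out) := by unfold Spec_GetCheckHighway; infer_instance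

-- ===== CLAIM (what is proved, stated in full; the proofs are below) =====
def Claim_equal_GetCheckHighway : Prop := ∀ (Ways : List (List (String × List (String × String)))), Dom_GetCheckHighway Ways → Pre_GetCheckHighway Ways → Spec_GetCheckHighway Ways (GetCheckHighway Ways)

-- ===== LEMMAS AND PROOFS =====
lemma pvValid_eq : pvValid = pvHighways := by decide

lemma pvAltLoop_fst : ∀ (ws : List (List (String × List (String × String)))) (he ee : Option String),
    (pvAltLoop ws (he, ee)).1 = he.or (pvLoop1 ws).head? := by
  intro ws
  induction ws with
  | nil => intro he ee; cases he <;> rfl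
  | cons w rest ih =>
    intro he ee
    simp only [pvAltLoop, pvLoop1]
    cases hh : pvGetKey ((pvGetKey w "tags").getD []) "highway" with
    | none => simp [ih]
    | some h =>
      by_cases hv : h ∈ pvHighways
      · have : ¬ (h ∉ pvValid ∧ he = none) := by simp [pvValid_eq, hv]
        simp [this, ih, hv]
      · cases he with
        | none => simp [pvValid_eq, hv, ih]
        | some a => simp [pvValid_eq, hv, ih]

lemma pvAltLoop_snd : ∀ (ws : List (List (String × List (String × String)))) (he ee : Option String),
    (pvAltLoop ws (he, ee)).2 = ee.or (pvLoop2 ws).head? := by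
  intro ws
  induction ws with
  | nil => intro he ee; cases ee <;> rfl
  | cons w rest ih =>
    intro he ee
    simp only [pvAltLoop, pvLoop2]
    cases hh : pvGetKey ((pvGetKey w "tags").getD []) "highway" with
    | some h => simp [hh, ih]
    | none =>
      cases hf : pvGetKey ((pvGetKey w "tags").getD []) "ferry" with
      | some v => simp [hh, hf, ih]
      | none =>
        cases ee with
        | none => simp [hf, ih]
        | some a => simp [hf, ih]

lemma pvLoop1_short : ∀ (ws : List (List (String × List (String × String)))),
    (pvLoop1 ws).head?.toList = pvLoop1 ws := by
  intro ws
  induction ws with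
  | nil => rfl
  | cons w rest ih =>
    simp only [pvLoop1]
    cases pvGetKey ((pvGetKey w "tags").getD []) "highway" with
    | none => exact ih
    | some h =>
      by_cases hv : h ∈ pvHighways
      · simp [hv, ih]
      · simp [hv]

lemma pvLoop2_short : ∀ (ws : List (List (String × List (String × String)))),
    (pvLoop2 ws).head?.toList = pvLoop2 ws := by
  intro ws
  induction ws with
  | nil => rfl
  | cons w rest ih =>
    simp only [pvLoop2]
    split <;> simp [ih]

-- ===== VERDICT (by name: the statement is the Claim_ definition above) =====
theorem GetCheckHighway_spec : Claim_equal_GetCheckHighway := by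
  intro Ways _ _
  unfold Spec_GetCheckHighway GetCheckHighway GetCheckHighway_alt
  simp only [pvAltLoop_fst, pvAltLoop_snd, Option.or, pvLoop1_short, pvLoop2_short]
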